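-- pv_equiv track=rewrite | github.com/btlin1213/FoC-CardGame-Simulation-Project | Optimal_Sample_Sol_1.py | comp10001go_partition
-- ===== SOURCE A (Python) =====
-- def comp10001go_partition(cards):
--
--     # BASE CASE 1: no cards, so no grouping to make
--     if len(cards) == 0:
--         return []
--
--     # BASE CASE 2: single card, so make a singleton group
--     if len(cards) == 1:
--         return [[cards]]
--
--     # RECURSIVE CASE
--     out = []
--     first = cards[0]
--     for sub_partition in comp10001go_partition(cards[1:]):
--
--         # insert `first` in each of the subpartition's groups
--         for n, subpart in enumerate(sub_partition):
--             out.append(sub_partition[:n] + [[first] + subpart] + sub_partition[n+1:])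
--
--         # put `first` in its own subpart
--         out.append([[first]] + sub_partition)
--     return out
-- ===== SOURCE B (Python) =====
-- def comp10001go_partition(cards):
--     # Iterative bottom-up build, right-to-left, instead of A's recursion.
--     if not cards:
--         return []
--     *init, last = cards
--     partitions = [[[last]]]
--     for first in reversed(init):
--         partitions = [p for sub in partitions for p in
--                       [sub[:n] + [[first] + sub[n]] + sub[n+1:]
--                        for n in range(len(sub))] + [[[first]] + sub]]
--     return partitions
-- ===== Notes on version B (the rewrite author's own statement) =====
-- stated objective: alternative
-- what changed: Replaced A's top-down recursion (peel the first card, recurse on the tail, grow an accumulator with nested appends) by an iterative bottom-up build: start from the partition of the last card and fold the remaining cards in right-to-left, rebuilding the partition list with comprehensions each round.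
import Mathlib
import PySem

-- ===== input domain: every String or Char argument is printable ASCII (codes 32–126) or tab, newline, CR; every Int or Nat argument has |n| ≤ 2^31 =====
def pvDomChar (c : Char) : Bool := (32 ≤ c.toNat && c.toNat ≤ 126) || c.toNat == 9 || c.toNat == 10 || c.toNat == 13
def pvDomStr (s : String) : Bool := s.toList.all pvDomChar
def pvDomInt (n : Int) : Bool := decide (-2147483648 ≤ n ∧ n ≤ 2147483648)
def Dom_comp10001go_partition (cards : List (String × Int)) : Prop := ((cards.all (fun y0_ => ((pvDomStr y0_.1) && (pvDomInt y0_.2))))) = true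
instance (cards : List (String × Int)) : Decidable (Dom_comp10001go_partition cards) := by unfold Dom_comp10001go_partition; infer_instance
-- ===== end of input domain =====

-- B replaces A's top-down recursion by an iterative bottom-up right-to-left build; same outputs in the same order.

-- ===== PORT A =====
-- Literal port of A: recursion on the first card; nested foldl accumulates `out` via appends,
-- sub_partition[:n] / sub_partition[n+1:] as PySem slices, enumerate as PySem.List.enumerate.
def comp10001go_partition (cards : List (String × Int)) : List (List (List (String × Int))) :=
  match cards with
  | [] => []
  | [c] => [[[c]]]
  | first :: rest =>
    (comp10001go_partition rest).foldl (fun out sub =>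
      ((PySem.List.enumerate sub 0).foldl (fun o p =>
        o ++ [PySem.List.slice sub none (some p.1) ++ [first :: p.2] ++
              PySem.List.slice sub (some (p.1 + 1)) none]) out)
      ++ [[first] :: sub]) []

-- ===== PORT B =====
-- sub[:n] + [[first]+sub[n]] + sub[n+1:] for a natural in-range n (take/drop are exact here)
def pvInsert (first : String × Int) (sub : List (List (String × Int))) (n : Nat) :
    List (List (String × Int)) :=
  sub.take n ++ (first :: sub.getD n []) :: sub.drop (n + 1)

-- one round of the loop: rebuild the partition list for one more card `first`
def pvStep (first : String × Int) (parts : List (List (List (String × Int)))) :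
    List (List (List (String × Int))) :=
  parts.flatMap (fun sub => (List.range sub.length).map (pvInsert first sub) ++ [[first] :: sub])

def comp10001go_partition_alt (cards : List (String × Int)) : List (List (List (String × Int))) :=
  match cards.getLast? with
  | none => []
  | some last => cards.dropLast.foldr pvStep [[[last]]]

-- ===== PRECONDITION & SPEC =====
def Spec_comp10001go_partition (cards : List (String × Int)) (out : List (List (List (String × Int)))) : Prop := out = comp10001go_partition_alt cards
instance (cards : List (String × Int)) (out : List (List (List (String × Int)))) : Decidable (Spec_comp10001go_partition cards out) := by unfold Spec_comp10001go_partition; infer_instance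

-- ===== CLAIM (what is proved, stated in full; the proofs are below) =====
def Claim_equal_comp10001go_partition : Prop := ∀ (cards : List (String × Int)), Dom_comp10001go_partition cards → Spec_comp10001go_partition cards (comp10001go_partition cards)

-- ===== LEMMAS AND PROOFS =====

-- A's per-subpartition body equals B's flatMap body
lemma body_eq (first : String × Int) (sub : List (List (String × Int))) (out : List (List (List (String × Int)))) :
    ((PySem.List.enumerate sub 0).foldl (fun o p =>
        o ++ [PySem.List.slice sub none (some p.1) ++ [first :: p.2] ++
              PySem.List.slice sub (some (p.1 + 1)) none]) out)
      ++ [[first] :: sub]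
    = out ++ ((List.range sub.length).map (pvInsert first sub) ++ [[first] :: sub]) := by
  rw [PySem.List.foldl_append_singleton_eq_map]
  rw [PySem.List.enumerate_eq_map_pyRange sub ([] : List (String × Int))]
  rw [show PySem.List.len sub = ((sub.length : Nat) : Int) from by simp [PySem.List.len]]
  rw [PySem.List.pyRange_zero_natCast, List.map_map, List.map_map]
  simp only [List.append_assoc]
  congr 2
  apply List.map_congr_left
  intro n _
  simp only [Function.comp_apply]
  have h1 : ((n : Int) + 1) = ((n + 1 : Nat) : Int) := by push_cast; ring
  rw [h1, PySem.List.slice_to_natCast, PySem.List.slice_from_natCast,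
    PySem.List.pyGetD_natCast]
  simp [pvInsert]

-- A's recursive step (for a nonempty tail) is B's pvStep
lemma step_eq (first : String × Int) (d : String × Int) (rs : List (String × Int)) :
    comp10001go_partition (first :: d :: rs) = pvStep first (comp10001go_partition (d :: rs)) := by
  show (comp10001go_partition (d :: rs)).foldl _ [] = _
  have h : ∀ (acc : List (List (List (String × Int)))) (l : List (List (List (String × Int)))),
      l.foldl (fun out sub =>
        ((PySem.List.enumerate sub 0).foldl (fun o p =>
          o ++ [PySem.List.slice sub none (some p.1) ++ [first :: p.2] ++
                PySem.List.slice sub (some (p.1 + 1)) none]) out)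
        ++ [[first] :: sub]) acc
      = acc ++ pvStep first l := by
    intro acc l
    rw [PySem.List.foldl_congr_mem l _
      (fun out sub => out ++ ((List.range sub.length).map (pvInsert first sub) ++ [[first] :: sub]))
      acc (fun out sub _ => body_eq first sub out)]
    rw [PySem.List.foldl_append_eq_flatMap]
    rfl
  simpa using h [] (comp10001go_partition (d :: rs))

lemma main_eq : ∀ cards, comp10001go_partition cards = comp10001go_partition_alt cards := by
  intro cards
  induction cards with
  | nil => rfl
  | cons c rest ih =>
    cases rest with
    | nil => rfl
    | cons d rs =>
      rw [step_eq, ih]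
      show _ = comp10001go_partition_alt (c :: d :: rs)
      unfold comp10001go_partition_alt
      rw [List.getLast?_cons_cons]
      cases h : (d :: rs).getLast? with
      | none => simp at h
      | some last =>
        simp only [List.dropLast_cons₂, List.foldr_cons]

-- ===== VERDICT (by name: the statement is the Claim_ definition above) =====
theorem comp10001go_partition_spec : Claim_equal_comp10001go_partition := by
  intro cards _
  show comp10001go_partition cards = comp10001go_partition_alt cards
  exact main_eq cards
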